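-- pv_equiv track=rewrite | github.com/JacRossiter/JExport | jex_export.py | remove_or_replace_characters
-- ===== SOURCE A (Python) =====
-- def remove_or_replace_characters(item_name):
--     char_to_remove_list = ["&"]
--     char_to_replace_list = [["/", "\\"]]
--     for i in char_to_remove_list:
--         if i in item_name:
--             item_name = item_name.replace(i, "")
--     for i in char_to_replace_list:
--         if i[0] in item_name:
--             item_name = item_name.replace(i[0], i[1])
--     return item_name
-- ===== SOURCE B (Python) =====
-- def remove_or_replace_characters(item_name):
--     out = []
--     for ch in item_name:
--         if ch == "&":
--             continue
--         out.append("\\" if ch == "/" else ch)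
--     return "".join(out)
-- ===== Notes on version B (the rewrite author's own statement) =====
-- stated objective: simpler
-- what changed: Replaces the two guarded sequential str.replace scans (each a full substring-search pass) with one character-by-character traversal that drops '&', maps '/' to '\', and joins the buffer.
import Mathlib
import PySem

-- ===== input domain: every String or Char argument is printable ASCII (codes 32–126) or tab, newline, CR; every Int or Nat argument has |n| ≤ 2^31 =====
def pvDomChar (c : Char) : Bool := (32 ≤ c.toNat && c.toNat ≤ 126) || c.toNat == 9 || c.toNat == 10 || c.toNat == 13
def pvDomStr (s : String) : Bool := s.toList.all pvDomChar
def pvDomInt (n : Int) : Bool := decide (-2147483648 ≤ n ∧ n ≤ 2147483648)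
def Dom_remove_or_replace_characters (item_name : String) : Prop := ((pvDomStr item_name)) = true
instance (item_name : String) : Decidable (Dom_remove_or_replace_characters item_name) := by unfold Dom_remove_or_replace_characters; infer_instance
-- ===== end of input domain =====

-- B replaces A's two guarded sequential str.replace scans with one single-pass
-- character loop that drops '&', maps '/' to '\', and joins the buffer (objective: simpler).


-- ===== PORT A =====
-- A: for each char in the remove list, if present, replace it by ""; then for each
-- [old, new] pair in the replace list, if old present, replace old by new.
def remove_or_replace_characters (item_name : String) : String :=
  let item_name :=
    ["&"].foldl
      (fun s i => if PySem.Str.isIn i s then PySem.Str.replace s i "" else s) item_name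
  let item_name :=
    [("/", "\\")].foldl
      (fun s i => if PySem.Str.isIn i.1 s then PySem.Str.replace s i.1 i.2 else s) item_name
  item_name

-- ===== PORT B =====
-- B: one pass; out is the list of kept characters, joined at the end ("".join(out)).
def remove_or_replace_characters_alt (item_name : String) : String :=
  String.ofList
    (item_name.toList.foldl
      (fun out ch => if ch = '&' then out else out ++ [if ch = '/' then '\\' else ch]) [])

-- ===== PRECONDITION & SPEC =====
def Spec_remove_or_replace_characters (item_name : String) (out : String) : Prop := out = remove_or_replace_characters_alt item_name
instance (item_name : String) (out : String) : Decidable (Spec_remove_or_replace_characters item_name out) := by unfold Spec_remove_or_replace_characters; infer_instance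

-- ===== CLAIM (what is proved, stated in full; the proofs are below) =====
def Claim_equal_remove_or_replace_characters : Prop := ∀ (item_name : String), Dom_remove_or_replace_characters item_name → Spec_remove_or_replace_characters item_name (remove_or_replace_characters item_name)

-- ===== LEMMAS AND PROOFS =====

-- single-character replace is a flatMap over the characters
theorem replace_go_single (c : Char) (new : List Char) :
    ∀ (l : List Char) (fuel : Nat) (acc : List Char), l.length ≤ fuel →
      PySem.Chars.replace.go [c] new fuel l acc
        = acc.reverse ++ l.flatMap (fun x => if x = c then new else [x]) := by
  intro l
  induction l with
  | nil =>
      intro fuel acc _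
      cases fuel <;> simp [PySem.Chars.replace.go]
  | cons x t ih =>
      intro fuel acc hle
      cases fuel with
      | zero => simp at hle
      | succ n =>
        have ht : t.length ≤ n := by simpa using hle
        by_cases hx : x = c
        · subst hx
          simp [PySem.Chars.replace.go, List.isPrefixOf, ih n _ ht]
        · have : ([c].isPrefixOf (x :: t)) = false := by
            simp [List.isPrefixOf]
            exact fun h => (hx h.symm).elim
          simp [PySem.Chars.replace.go, this, ih n _ ht, hx]

theorem replace_single (s : List Char) (c : Char) (new : List Char) :
    PySem.Chars.replace s [c] new
      = s.flatMap (fun x => if x = c then new else [x]) := by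
  simpa using replace_go_single c new s s.length [] le_rfl

-- a flatMap that keeps every character untouched is the identity
theorem flatMap_id_of_not_mem (c : Char) (new : List Char) (l : List Char) (h : c ∉ l) :
    l.flatMap (fun x => if x = c then new else [x]) = l := by
  induction l with
  | nil => simp
  | cons x t ih =>
      simp at h
      simp only [List.flatMap_cons, ih h.2]
      rw [if_neg (by intro he; exact h.1 he.symm)]
      simp

-- B's foldl builds the flatMap of its per-character images
theorem alt_foldl_eq_flatMap (l : List Char) (acc : List Char) :
    l.foldl (fun out ch => if ch = '&' then out else out ++ [if ch = '/' then '\\' else ch]) acc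
      = acc ++ l.flatMap (fun ch => if ch = '&' then [] else [if ch = '/' then '\\' else ch]) := by
  induction l generalizing acc with
  | nil => simp
  | cons x t ih => by_cases hx : x = '&' <;> simp [hx, ih]

theorem singleton_infix_iff (c : Char) (l : List Char) : [c] <:+: l ↔ c ∈ l := by
  constructor
  · intro h; exact h.subset (by simp)
  · intro h
    obtain ⟨a, b, rfl⟩ := List.mem_iff_append.mp h
    exact ⟨a, b, by simp⟩

-- ===== VERDICT (by name: the statement is the Claim_ definition above) =====
theorem remove_or_replace_characters_spec : Claim_equal_remove_or_replace_characters := by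
  intro s _
  unfold Spec_remove_or_replace_characters remove_or_replace_characters remove_or_replace_characters_alt
  simp only [List.foldl]
  rw [alt_foldl_eq_flatMap]
  -- reduce both guarded replaces to flatMaps on the character list
  have key : ∀ l : List Char,
      ((if PySem.Chars.isIn ['&'] l then PySem.Chars.replace l ['&'] [] else l).flatMap
          (fun x => if x = '/' then ['\\'] else [x]))
        = l.flatMap (fun ch => if ch = '&' then [] else [if ch = '/' then '\\' else ch]) := by
    intro l
    have hrem : (if PySem.Chars.isIn ['&'] l then PySem.Chars.replace l ['&'] [] else l)
        = l.flatMap (fun x => if x = '&' then [] else [x]) := by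
      by_cases h : PySem.Chars.isIn ['&'] l
      · rw [if_pos h, replace_single]
      · rw [if_neg h]
        have hmem : '&' ∉ l := by
          intro hm
          exact h (by
            have : (['&'] : List Char) <:+: l := (singleton_infix_iff _ _).mpr hm
            simpa [PySem.Chars.isIn, PySem.Chars.find_ne_neg_one_iff] using
              (PySem.Chars.find_ne_neg_one_iff (s := l) (sub := ['&'])).mpr this)
        exact (flatMap_id_of_not_mem '&' [] l hmem).symm
    rw [hrem, List.flatMap_assoc]
    apply List.flatMap_congr  -- pointwise equality of the composed per-character maps
    intro x _
    by_cases hx : x = '&' <;> by_cases hy : x = '/' <;> simp_all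
  have key2 : ∀ l : List Char,
      (if PySem.Chars.isIn ['/'] l then PySem.Chars.replace l ['/'] ['\\'] else l)
        = l.flatMap (fun x => if x = '/' then ['\\'] else [x]) := by
    intro l
    by_cases h : PySem.Chars.isIn ['/'] l
    · rw [if_pos h, replace_single]
    · rw [if_neg h]
      have hmem : '/' ∉ l := by
        intro hm
        exact h (by
          have : (['/'] : List Char) <:+: l := (singleton_infix_iff _ _).mpr hm
          simpa [PySem.Chars.isIn, PySem.Chars.find_ne_neg_one_iff] using
            (PySem.Chars.find_ne_neg_one_iff (s := l) (sub := ['/'])).mpr this)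
      exact (flatMap_id_of_not_mem '/' ['\\'] l hmem).symm
  simp only [PySem.Str.isIn, PySem.Str.replace]
  have lamp : ("&" : String).toList = ['&'] := by decide
  have lsl : ("/" : String).toList = ['/'] := by decide
  have lbs : ("\\" : String).toList = ['\\'] := by decide
  have lemp : ("" : String).toList = [] := by decide
  simp only [lamp, lsl, lbs, lemp, List.nil_append]
  have hu : (if PySem.Chars.isIn ['&'] s.toList = true then
        String.ofList (PySem.Chars.replace s.toList ['&'] []) else s).toList
      = (if PySem.Chars.isIn ['&'] s.toList = true then
        PySem.Chars.replace s.toList ['&'] [] else s.toList) := by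
    split <;> simp
  rw [← key s.toList, ← hu]
  split <;> (rw [← key2]; split <;> simp_all)
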